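-- pv_equiv track=rewrite | github.com/fangyc220/MyStanCodeProjects | boggle_game_solver/anagram_02.py | find_anagrams_helper
-- ===== SOURCE A (Python) =====
-- EARLY_STOPPING = 2
--
-- def find_anagrams_helper(d_ans, enter_s, current_s, words, ans_lst):
--     """
--     basecase設定的條件如下：
--     1. recursion排列後的str字母長度要等於使用者輸入的字母長度
--     2. recursion排列的字母數量與使用者輸入的字母數量要一致
--     3. 排除有相同排列str
--     """
--
--     if len(current_s) == len(enter_s):  # Base case條件之一, 先讓recursion抓出與使用者輸入字元一樣的長度
--         if base_case_check(current_s, d_ans, ans_lst):  # 另外寫function確認base case條件是否都有達到，如果有就回傳True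
--             ans_lst.append(current_s)
--     else:
--         for s in enter_s:
--             # early stopping
--             if len(current_s) == EARLY_STOPPING:  # 只抓取字串長度==2時進入early stopping
--                 if has_prefix(current_s, words):
--                     break
--             # choose
--             current_s += s
--
--             # explore
--             find_anagrams_helper(d_ans, enter_s, current_s, words, ans_lst)
--
--             # un-choose
--             current_s = current_s[:len(current_s)-1]
--     return ans_lst
--
-- def base_case_check(current_s, d_ans, ans_lst):
--     d_s = {}
--     for s in current_s:  # 把recursion排列的str轉換成dic
--         if s in d_s:
--             d_s[s] += 1
--         else:
--             d_s[s] = 1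
--
--     if d_s == d_ans:  # 比對使用者的dic以及recursion的dic
--         if current_s not in ans_lst:  # 排除重覆的
--             return True
--     return False
--
-- def has_prefix(sub_s, words):
--     """
--     :param sub_s: str, 當下recursion排列的str
--     :return: boolean, 會比對sub_s在字典內是否有對應開頭的單字，有就回傳true
--     """
--     for word in words:
--         if word.startswith(sub_s):
--             return False
--     return True
-- ===== SOURCE B (Python) =====
-- # B: walk only the distinct letter-permutations described by d_ans (a DFS over a
-- # running letter counter, branching on the distinct characters of enter_s), with
-- # the same length-2 word-prefix pruning, instead of enumerating every character
-- # sequence over enter_s and testing each full string's counter.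
-- # Like A, it appends the results to ans_lst in place and returns it.
--
--
-- def find_anagrams_helper(d_ans, enter_s, current_s, words, ans_lst):
--     n = len(enter_s)
--     used = {}                       # letter counter of the string built so far
--     for c in current_s:
--         used[c] = used.get(c, 0) + 1
--     alphabet = list(dict.fromkeys(enter_s))
--
--     def dfs(prefix):
--         if len(prefix) == n:
--             if used == d_ans and prefix not in ans_lst:
--                 ans_lst.append(prefix)
--         elif len(prefix) == 2 and not any(w.startswith(prefix) for w in words):
--             return
--         else:
--             for c in alphabet:
--                 if used.get(c, 0) < d_ans.get(c, 0):
--                     used[c] = used.get(c, 0) + 1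
--                     dfs(prefix + c)
--                     used[c] -= 1
--                     if used[c] == 0:    # keep `used` the exact counter of prefix
--                         del used[c]
--
--     dfs(current_s)
--     return ans_lst
-- ===== Notes on version B (the rewrite author's own statement) =====
-- stated objective: alternative
-- what changed: A enumerates every length-n character sequence over enter_s (n^n branches) and rebuilds each full string's character counter from scratch to compare with d_ans; B maintains one running letter counter and DFS-walks only the distinct multiset permutations allowed by d_ans (branching on the de-duplicated alphabet, bounded by the remaining counts), with the same depth-2 word-prefix pruning. Pre_ excludes current_s longer than a nonempty enter_s, where A's recursion can never reach its base case and (except when the depth-2 prune fires immediately) raises RecursionError.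
-- outside the precondition, e.g. on find_anagrams_helper({}, 'a', 'zz', [], []): A returns [], B returns []
-- crash fix: When len(current_s) > len(enter_s), enter_s is nonempty and the depth-2 early-stopping break cannot fire (len(current_s) > 2, or some word starts with current_s), A recurses forever and raises RecursionError; B returns ans_lst unchanged. — e.g. on find_anagrams_helper([("a", 1)], "a", "bbb", [], []): A raises RecursionError, B returns []
import Mathlib
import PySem

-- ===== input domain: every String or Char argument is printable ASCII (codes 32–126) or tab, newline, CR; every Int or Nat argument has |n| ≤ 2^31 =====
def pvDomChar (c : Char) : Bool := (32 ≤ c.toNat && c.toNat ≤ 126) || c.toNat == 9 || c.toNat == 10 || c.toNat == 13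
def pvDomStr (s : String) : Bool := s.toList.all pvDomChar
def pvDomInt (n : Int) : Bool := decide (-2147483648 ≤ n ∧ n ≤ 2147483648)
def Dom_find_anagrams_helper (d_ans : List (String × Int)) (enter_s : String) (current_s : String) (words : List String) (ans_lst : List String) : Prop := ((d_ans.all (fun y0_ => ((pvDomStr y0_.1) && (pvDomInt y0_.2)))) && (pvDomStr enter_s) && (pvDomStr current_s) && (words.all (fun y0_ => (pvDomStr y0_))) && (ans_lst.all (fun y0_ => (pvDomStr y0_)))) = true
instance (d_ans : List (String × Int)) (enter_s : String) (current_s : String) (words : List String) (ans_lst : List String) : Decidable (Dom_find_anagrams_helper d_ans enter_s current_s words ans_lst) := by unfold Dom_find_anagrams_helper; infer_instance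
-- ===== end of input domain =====

-- B replaces A's exhaustive enumeration of all len(enter_s)^k character sequences
-- (each tested by rebuilding its character counter) by a DFS over the distinct
-- multiset permutations allowed by d_ans, maintained in one running counter
-- (objective: alternative algorithm). Both Pythons mutate ans_lst in place the
-- same way; the theorems are about the returned list.

-- ===== PORT A =====
-- Python dict `==` ignores insertion order: equal key sets and equal values.
def pyDictEq (d e : PySem.Dict String Int) : Bool :=
  PySem.Set.equal d.keys e.keys && d.keys.all (fun k => d.get? k == e.get? k)

-- the d_s-building loop of base_case_check
def buildCount (current_s : List Char) : PySem.Dict String Int :=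
  current_s.foldl (fun d s =>
    let k := String.ofList [s]
    if d.contains k then d.insert k (d.getD k 0 + 1) else d.insert k 1) PySem.Dict.empty

def base_case_check (current_s : List Char) (d_ans : PySem.Dict String Int)
    (ans_lst : List String) : Bool :=
  if pyDictEq (buildCount current_s) d_ans then
    if !(ans_lst.contains (String.ofList current_s)) then true else false
  else false

def has_prefix (sub_s : String) (words : List String) : Bool :=
  match words with
  | [] => true
  | word :: rest => if PySem.Str.startswith word sub_s then false else has_prefix sub_s rest

mutual
-- the recursive body; fuel only makes the non-terminating region (len(current_s) >
-- len(enter_s) with enter_s nonempty, where Python raises RecursionError) total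
def goA (d_ans : PySem.Dict String Int) (enter : List Char) (words : List String) :
    Nat → List Char → List String → List String
  | fuel, cur, ans =>
    if cur.length = enter.length then
      if base_case_check cur d_ans ans then ans ++ [String.ofList cur] else ans
    else
      match fuel with
      | 0 => ans
      | fuel + 1 => loopA d_ans enter words fuel cur enter ans
termination_by fuel _ _ => (fuel, 0)

-- the `for s in enter_s` loop with its early-stopping break
def loopA (d_ans : PySem.Dict String Int) (enter : List Char) (words : List String) :
    Nat → List Char → List Char → List String → List String
  | _, _, [], ans => ans
  | fuel, cur, s :: rest, ans =>
    if cur.length == 2 && has_prefix (String.ofList cur) words then ans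
    else loopA d_ans enter words fuel cur rest (goA d_ans enter words fuel (cur ++ [s]) ans)
termination_by fuel _ pending _ => (fuel, pending.length + 1)
end

def find_anagrams_helper (d_ans : List (String × Int)) (enter_s : String) (current_s : String) (words : List String) (ans_lst : List String) : List String :=
  goA (PySem.Dict.mk d_ans) enter_s.toList words (enter_s.toList.length + 1) current_s.toList ans_lst

-- ===== PORT B =====
def hasAnyPrefixB (pre : String) (words : List String) : Bool :=
  words.any (fun w => PySem.Str.startswith w pre)

-- the `used[c] = used.get(c, 0) + 1` seeding loop over current_s
def seedUsed (cs : List Char) : PySem.Dict String Int :=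
  cs.foldl (fun d c =>
    d.insert (String.ofList [c]) (d.getD (String.ofList [c]) 0 + 1)) PySem.Dict.empty

-- dfs: `used` is the running counter of `pre`; the Python un-choose
-- (decrement, deleting a zero entry) restores `used` exactly, so the fold
-- continues with the unchanged dict.  fuel only bounds the recursion depth.
def dfsB (alphabet : List Char) (n : Nat) (dans : PySem.Dict String Int) (words : List String) :
    Nat → List Char → PySem.Dict String Int → List String → List String
  | fuel, pre, used, ans =>
    if pre.length = n then
      if pyDictEq used dans && !(ans.contains (String.ofList pre)) then
        ans ++ [String.ofList pre]
      else ans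
    else if pre.length == 2 && !(hasAnyPrefixB (String.ofList pre) words) then ans
    else
      match fuel with
      | 0 => ans
      | fuel + 1 =>
        alphabet.foldl (fun a c =>
          if used.getD (String.ofList [c]) 0 < dans.getD (String.ofList [c]) 0 then
            dfsB alphabet n dans words fuel (pre ++ [c])
              (used.insert (String.ofList [c]) (used.getD (String.ofList [c]) 0 + 1)) a
          else a) ans

def find_anagrams_helper_alt (d_ans : List (String × Int)) (enter_s : String) (current_s : String) (words : List String) (ans_lst : List String) : List String :=
  dfsB (PySem.List.dedup enter_s.toList) enter_s.toList.length (PySem.Dict.mk d_ans) words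
    (enter_s.toList.length + 1) current_s.toList (seedUsed current_s.toList) ans_lst

-- ===== PRECONDITION & SPEC =====
-- Pre_ excludes current_s longer than a nonempty enter_s: there A's recursion can
-- never reach its base case and, except when the depth-2 prune fires immediately
-- (then both return ans_lst unchanged, see claim cites), raises RecursionError.
def Pre_find_anagrams_helper (d_ans : List (String × Int)) (enter_s : String) (current_s : String) (words : List String) (ans_lst : List String) : Prop :=
  current_s.toList.length ≤ enter_s.toList.length ∨ enter_s = ""
instance (d_ans : List (String × Int)) (enter_s : String) (current_s : String) (words : List String) (ans_lst : List String) : Decidable (Pre_find_anagrams_helper d_ans enter_s current_s words ans_lst) := by unfold Pre_find_anagrams_helper; infer_instance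

def pvWitness_find_anagrams_helper : (List (String × Int)) × String × String × List String × List String :=
  ([("a", 1), ("b", 1)], "ab", "", ["ab"], [])

-- When len(current_s) > len(enter_s), enter_s is nonempty, and the length-2
-- early-stopping break cannot fire (len(current_s) > 2, or some word starts with
-- current_s), A recurses without reaching its base case and raises RecursionError;
-- B returns ans_lst unchanged.
def Raises_find_anagrams_helper (d_ans : List (String × Int)) (enter_s : String) (current_s : String) (words : List String) (ans_lst : List String) : Prop :=
  enter_s.toList.length < current_s.toList.length ∧ enter_s ≠ "" ∧
    (2 < current_s.toList.length ∨ words.any (fun w => PySem.Str.startswith w current_s) = true)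
instance (d_ans : List (String × Int)) (enter_s : String) (current_s : String) (words : List String) (ans_lst : List String) : Decidable (Raises_find_anagrams_helper d_ans enter_s current_s words ans_lst) := by unfold Raises_find_anagrams_helper; infer_instance

def pvRaiseWitness_find_anagrams_helper : (List (String × Int)) × String × String × List String × List String :=
  ([("a", 1)], "a", "bbb", [], [])
def pvRaiseWitnessOut_find_anagrams_helper : List String := []

def Spec_find_anagrams_helper (d_ans : List (String × Int)) (enter_s : String) (current_s : String) (words : List String) (ans_lst : List String) (out : List String) : Prop := out = find_anagrams_helper_alt d_ans enter_s current_s words ans_lst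
instance (d_ans : List (String × Int)) (enter_s : String) (current_s : String) (words : List String) (ans_lst : List String) (out : List String) : Decidable (Spec_find_anagrams_helper d_ans enter_s current_s words ans_lst out) := by unfold Spec_find_anagrams_helper; infer_instance

-- ===== CLAIM (what is proved, stated in full; the proofs are below) =====
def Claim_equal_find_anagrams_helper : Prop := ∀ (d_ans : List (String × Int)) (enter_s : String) (current_s : String) (words : List String) (ans_lst : List String), Dom_find_anagrams_helper d_ans enter_s current_s words ans_lst → Pre_find_anagrams_helper d_ans enter_s current_s words ans_lst → Spec_find_anagrams_helper d_ans enter_s current_s words ans_lst (find_anagrams_helper d_ans enter_s current_s words ans_lst)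

def Claim_raises_find_anagrams_helper : Prop := (∀ (d_ans : List (String × Int)) (enter_s : String) (current_s : String) (words : List String) (ans_lst : List String), Dom_find_anagrams_helper d_ans enter_s current_s words ans_lst → Raises_find_anagrams_helper d_ans enter_s current_s words ans_lst → ¬ Pre_find_anagrams_helper d_ans enter_s current_s words ans_lst) ∧ (Dom_find_anagrams_helper (pvRaiseWitness_find_anagrams_helper.1) (pvRaiseWitness_find_anagrams_helper.2.1) (pvRaiseWitness_find_anagrams_helper.2.2.1) (pvRaiseWitness_find_anagrams_helper.2.2.2.1) (pvRaiseWitness_find_anagrams_helper.2.2.2.2) ∧ Raises_find_anagrams_helper (pvRaiseWitness_find_anagrams_helper.1) (pvRaiseWitness_find_anagrams_helper.2.1) (pvRaiseWitness_find_anagrams_helper.2.2.1) (pvRaiseWitness_find_anagrams_helper.2.2.2.1) (pvRaiseWitness_find_anagrams_helper.2.2.2.2) ∧ find_anagrams_helper_alt (pvRaiseWitness_find_anagrams_helper.1) (pvRaiseWitness_find_anagrams_helper.2.1) (pvRaiseWitness_find_anagrams_helper.2.2.1) (pvRaiseWitness_find_anagrams_helper.2.2.2.1) (pvRaiseWitness_find_anagrams_helper.2.2.2.2)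 = pvRaiseWitnessOut_find_anagrams_helper)

-- ===== LEMMAS AND PROOFS =====

-- the key (1-character string) of a character
def ck (c : Char) : String := String.ofList [c]

-- the full list of counter-matching completions A's tree emits at node `cur`
-- (with repetitions; membership filtering is factored out as Set.update)
def candA (dans : PySem.Dict String Int) (enter : List Char) (words : List String) :
    Nat → List Char → List String
  | fuel, cur =>
    if cur.length = enter.length then
      (if pyDictEq (buildCount cur) dans then [String.ofList cur] else [])
    else
      match fuel with
      | 0 => []
      | fuel + 1 =>
        if cur.length == 2 && has_prefix (String.ofList cur) words then []
        else enter.flatMap (fun c => candA dans enter words fuel (cur ++ [c]))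
termination_by fuel _ => fuel

lemma update_of_forall_mem {s l : List String} (h : ∀ x ∈ l, x ∈ s) :
    PySem.Set.update s l = s := by
  rw [PySem.Set.update_eq_append_filter]
  have hnil : (PySem.Set.ofList l).filter (fun y => !(PySem.Set.contains s y)) = [] := by
    rw [List.filter_eq_nil_iff]
    intro y hy
    have hys : y ∈ s := h y ((PySem.Set.mem_ofList _ _).mp hy)
    simpa using hys
  rw [hnil, List.append_nil]

lemma update_flatMap (s : List String) (l : List Char) (f : Char → List String) :
    PySem.Set.update s (l.flatMap f) = l.foldl (fun a c => PySem.Set.update a (f c)) s := by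
  induction l generalizing s with
  | nil => simp [PySem.Set.update]
  | cons c rest ih =>
    simp only [List.flatMap_cons, List.foldl_cons]
    rw [PySem.Set.update_append, ih]

lemma mem_foldl_update {x : String} {s : List String} {l : List Char} {f : Char → List String}
    (h : x ∈ s) : x ∈ l.foldl (fun a c => PySem.Set.update a (f c)) s := by
  induction l generalizing s with
  | nil => exact h
  | cons c rest ih => exact ih ((PySem.Set.mem_update _ _ _).mpr (Or.inl h))

lemma mem_foldl_update_of_mem {c : Char} {x : String} {s : List String} {l : List Char}
    {f : Char → List String} (hc : c ∈ l) (hx : x ∈ f c) :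
    x ∈ l.foldl (fun a c => PySem.Set.update a (f c)) s := by
  induction l generalizing s with
  | nil => cases hc
  | cons a rest ih =>
    rw [List.foldl_cons]
    rcases List.mem_cons.mp hc with h | h
    · subst h
      exact mem_foldl_update ((PySem.Set.mem_update _ _ _).mpr (Or.inr hx))
    · exact ih h

lemma foldl_update_dedup (f : Char → List String) (l : List Char) (s : List String) :
    l.foldl (fun a c => PySem.Set.update a (f c)) s
      = (PySem.List.dedup l).foldl (fun a c => PySem.Set.update a (f c)) s := by
  induction l using List.reverseRecOn with
  | nil => simp [PySem.List.dedup]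
  | append_singleton l c ih =>
    rw [List.foldl_append]
    by_cases hc : c ∈ l
    · have habs : PySem.Set.update (l.foldl (fun a c => PySem.Set.update a (f c)) s) (f c)
          = l.foldl (fun a c => PySem.Set.update a (f c)) s :=
        update_of_forall_mem (fun x hx => mem_foldl_update_of_mem hc hx)
      have hd : PySem.List.dedup (l ++ [c]) = PySem.List.dedup l := by
        simp only [PySem.List.dedup_eq_ofList, PySem.Set.ofList_append_singleton]
        exact PySem.Set.add_of_mem ((PySem.Set.mem_ofList _ _).mpr hc)
      simp only [List.foldl_cons, List.foldl_nil]
      rw [habs, hd, ih]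
    · have hd : PySem.List.dedup (l ++ [c]) = PySem.List.dedup l ++ [c] := by
        simp only [PySem.List.dedup_eq_ofList, PySem.Set.ofList_append_singleton]
        exact PySem.Set.add_of_not_mem (fun h => hc ((PySem.Set.mem_ofList _ _).mp h))
      simp only [List.foldl_cons, List.foldl_nil]
      rw [hd, List.foldl_append, ih]
      simp

lemma has_prefix_eq_not_any (s : String) (ws : List String) :
    has_prefix s ws = !(hasAnyPrefixB s ws) := by
  induction ws with
  | nil => rfl
  | cons w rest ih =>
    rw [has_prefix]
    cases hsw : PySem.Str.startswith w s
    · rw [if_neg (by simp), ih]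
      simp only [hasAnyPrefixB, List.any_cons]
      rw [hsw]
      simp
    · rw [if_pos rfl]
      simp only [hasAnyPrefixB, List.any_cons]
      rw [hsw]
      simp

lemma base_step (dans : PySem.Dict String Int) (cur : List Char) (ans : List String) :
    (if base_case_check cur dans ans then ans ++ [String.ofList cur] else ans)
      = PySem.Set.update ans (if pyDictEq (buildCount cur) dans then [String.ofList cur] else []) := by
  unfold base_case_check
  by_cases h : pyDictEq (buildCount cur) dans
  · rw [if_pos h, if_pos h]
    have hupd : PySem.Set.update ans [String.ofList cur]
        = PySem.Set.add ans (String.ofList cur) := rfl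
    by_cases hmem : String.ofList cur ∈ ans
    · rw [if_neg (by simp [hmem])]
      rw [hupd, PySem.Set.add_of_mem hmem]
    · rw [if_pos (by simp [hmem])]
      rw [hupd, PySem.Set.add_of_not_mem hmem]
  · rw [if_neg h, if_neg h]
    rfl

lemma loopA_prune (d_ans : PySem.Dict String Int) (enter : List Char) (words : List String)
    (fuel : Nat) (cur pending : List Char) (ans : List String)
    (h : (cur.length == 2 && has_prefix (String.ofList cur) words) = true) :
    loopA d_ans enter words fuel cur pending ans = ans := by
  cases pending with
  | nil => rw [loopA]
  | cons s rest => rw [loopA]; simp [h]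

lemma goA_eq (d_ans : PySem.Dict String Int) (enter : List Char) (words : List String) :
    ∀ (fuel : Nat) (cur : List Char) (ans : List String),
      goA d_ans enter words fuel cur ans
        = PySem.Set.update ans (candA d_ans enter words fuel cur) := by
  intro fuel
  induction fuel with
  | zero =>
    intro cur ans
    rw [goA, candA]
    by_cases h : cur.length = enter.length
    · simp only [h, if_true]
      exact base_step d_ans cur ans
    · simp [h, PySem.Set.update]
  | succ fuel ih =>
    intro cur ans
    rw [goA, candA]
    by_cases h : cur.length = enter.length
    · simp only [h, if_true]
      exact base_step d_ans cur ans
    · simp only [h, if_false]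
      cases hp : (cur.length == 2 && has_prefix (String.ofList cur) words) with
      | true =>
        rw [loopA_prune _ _ _ _ _ _ _ hp]
        simp
      | false =>
        simp only [Bool.false_eq_true, if_false]
        rw [eq_comm, update_flatMap]
        have : ∀ (pending : List Char) (ans : List String),
            loopA d_ans enter words fuel cur pending ans
              = pending.foldl (fun a c =>
                  PySem.Set.update a (candA d_ans enter words fuel (cur ++ [c]))) ans := by
          intro pending
          induction pending with
          | nil => intro ans; rw [loopA]; simp
          | cons s rest ihp =>
            intro ans
            rw [loopA]
            simp only [hp, Bool.false_eq_true, if_false, List.foldl_cons]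
            rw [ihp, ih]
        rw [this enter ans]

lemma buildCount_eq_counter (cur : List Char) :
    buildCount cur = PySem.Dict.counter (cur.map ck) := by
  rw [← PySem.Dict.foldl_insert_getD_add_one_eq_counter, List.foldl_map]
  unfold buildCount
  apply PySem.List.foldl_congr_mem
  intro d c _
  by_cases h : d.contains (String.ofList [c])
  · simp [ck, h]
  · simp [ck, h, PySem.Dict.getD_of_not_contains d (0 : Int) (by simpa using h)]

lemma seedUsed_eq_counter (cs : List Char) :
    seedUsed cs = PySem.Dict.counter (cs.map ck) := by
  rw [← PySem.Dict.foldl_insert_getD_add_one_eq_counter, List.foldl_map]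
  rfl

lemma counter_append (xs : List String) (k : String) :
    PySem.Dict.counter (xs ++ [k])
      = (PySem.Dict.counter xs).insert k ((PySem.Dict.counter xs).getD k 0 + 1) := by
  rw [← PySem.Dict.foldl_insert_getD_add_one_eq_counter,
      ← PySem.Dict.foldl_insert_getD_add_one_eq_counter, List.foldl_append]
  simp

lemma mem_keys_of_getD_ne {dans : PySem.Dict String Int} {k : String}
    (h : dans.getD k 0 ≠ 0) : k ∈ dans.keys := by
  by_cases hc : dans.contains k
  · exact (PySem.Dict.contains_iff_mem_keys _ _).mp hc
  · exact absurd (PySem.Dict.getD_of_not_contains dans (0 : Int) (by simpa using hc)) h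

lemma get?_eq_some_getD {dans : PySem.Dict String Int} {k : String}
    (h : k ∈ dans.keys) : dans.get? k = some (dans.getD k 0) := by
  have hc : dans.contains k = true := (PySem.Dict.contains_iff_mem_keys _ _).mpr h
  cases hv : dans.get? k with
  | none => exact absurd ((PySem.Dict.get?_eq_none_iff_contains _ _).mp hv) (by simp [hc])
  | some v => rw [PySem.Dict.getD_of_get?_eq_some dans 0 hv]

-- if the counters match as Python dicts, every key count agrees
lemma count_eq_of_pyDictEq {cur : List Char} {dans : PySem.Dict String Int}
    (hok : pyDictEq (buildCount cur) dans = true) :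
    ∀ k, ((cur.map ck).count k : Int) = dans.getD k 0 := by
  rw [buildCount_eq_counter] at hok
  unfold pyDictEq at hok
  rw [Bool.and_eq_true, PySem.Set.equal_iff, List.all_eq_true] at hok
  obtain ⟨hkeys, hvals⟩ := hok
  have hmem : ∀ k, k ∈ (cur.map ck) ↔ k ∈ dans.keys := by
    intro k
    have := hkeys k
    rwa [PySem.Dict.keys_counter, PySem.Set.mem_ofList] at this
  have hcnt : ∀ k ∈ (cur.map ck), ((cur.map ck).count k : Int) = dans.getD k 0 := by
    intro k hk
    have hky : k ∈ (PySem.Dict.counter (cur.map ck)).keys := by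
      rw [PySem.Dict.keys_counter, PySem.Set.mem_ofList]; exact hk
    have := hvals k hky
    rw [get?_eq_some_getD hky, get?_eq_some_getD ((hmem k).mp hk)] at this
    have heq : (PySem.Dict.counter (cur.map ck)).getD k 0 = dans.getD k 0 := by
      simpa using this
    rwa [PySem.Dict.getD_counter] at heq
  intro k
  by_cases hk : k ∈ (cur.map ck)
  · exact hcnt k hk
  · have h0 : (cur.map ck).count k = 0 := List.count_eq_zero.mpr hk
    have hnk : k ∉ dans.keys := fun h => hk ((hmem k).mpr h)
    have : dans.getD k 0 = 0 := by
      by_contra hne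
      exact hnk (mem_keys_of_getD_ne hne)
    omega

-- generic emptiness principle for candA
lemma candA_nil_of (dans : PySem.Dict String Int) (enter : List Char) (words : List String)
    (P : List Char → Prop)
    (hstep : ∀ (c : Char) (cur : List Char), P cur → P (cur ++ [c]))
    (hbase : ∀ cur : List Char, P cur → cur.length = enter.length →
      pyDictEq (buildCount cur) dans = false) :
    ∀ (fuel : Nat) (cur : List Char), P cur → candA dans enter words fuel cur = [] := by
  intro fuel
  induction fuel with
  | zero =>
    intro cur hP
    rw [candA]
    by_cases h : cur.length = enter.length
    · simp [h, hbase cur hP h]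
    · simp [h]
  | succ fuel ih =>
    intro cur hP
    rw [candA]
    by_cases h : cur.length = enter.length
    · simp [h, hbase cur hP h]
    · simp only [h, if_false]
      cases hp : (cur.length == 2 && has_prefix (String.ofList cur) words)
      · simp only [Bool.false_eq_true, if_false]
        apply List.flatMap_eq_nil_iff.mpr
        intro c _
        exact ih (cur ++ [c]) (hstep c cur hP)
      · simp

lemma ck_def (c : Char) : String.ofList [c] = ck c := rfl

lemma count_map_ck_append (cur : List Char) (c : Char) (k : String) :
    ((((cur ++ [c]).map ck).count k : Int))
      = ((cur.map ck).count k : Int) + (if k = ck c then 1 else 0) := by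
  rw [List.map_append, List.count_append]
  by_cases h : k = ck c
  · simp [h]
  · have : (ck c == k) = false := by
      simp
      exact fun he => h he.symm
    simp [List.count_singleton, this, h]

-- candA is empty as soon as some key is over-used relative to d_ans
lemma candA_nil_overuse (dans : PySem.Dict String Int) (enter : List Char) (words : List String)
    (k0 : String) (fa : Nat) (cur : List Char)
    (h : dans.getD k0 0 < ((cur.map ck).count k0 : Int)) :
    candA dans enter words fa cur = [] := by
  apply candA_nil_of dans enter words
    (fun cur' => dans.getD k0 0 < ((cur'.map ck).count k0 : Int))
  · intro c' cur' hP
    have hP' : dans.getD k0 0 < ((cur'.map ck).count k0 : Int) := hP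
    show dans.getD k0 0 < (((cur' ++ [c']).map ck).count k0 : Int)
    rw [count_map_ck_append]
    by_cases hc : k0 = ck c'
    · rw [if_pos hc]; omega
    · rw [if_neg hc]; omega
  · intro cur' hP _
    have hP' : dans.getD k0 0 < ((cur'.map ck).count k0 : Int) := hP
    rw [Bool.eq_false_iff]
    intro hok
    have := count_eq_of_pyDictEq hok k0
    omega
  · exact h

-- base case of the main equivalence: both sides run the same dict comparison
lemma main_base (dans : PySem.Dict String Int) (enter : List Char) (words : List String)
    (cur : List Char) (fa fb : Nat) (ans : List String)
    (hl : cur.length = enter.length) :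
    PySem.Set.update ans (candA dans enter words fa cur)
      = dfsB (PySem.List.dedup enter) enter.length dans words fb cur
          (PySem.Dict.counter (cur.map ck)) ans := by
  have hA : candA dans enter words fa cur
      = (if pyDictEq (buildCount cur) dans then [String.ofList cur] else []) := by
    cases fa <;> (rw [candA]; rw [if_pos hl])
  have hB : dfsB (PySem.List.dedup enter) enter.length dans words fb cur
        (PySem.Dict.counter (cur.map ck)) ans
      = if pyDictEq (PySem.Dict.counter (cur.map ck)) dans
            && !(ans.contains (String.ofList cur)) then
          ans ++ [String.ofList cur]
        else ans := by
    cases fb <;> (rw [dfsB]; rw [if_pos hl])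
  rw [hA, hB, ← buildCount_eq_counter]
  by_cases h : pyDictEq (buildCount cur) dans
  · rw [if_pos h]
    have hupd : PySem.Set.update ans [String.ofList cur]
        = PySem.Set.add ans (String.ofList cur) := rfl
    by_cases hmem : String.ofList cur ∈ ans
    · rw [if_neg (by simp [h, hmem]), hupd, PySem.Set.add_of_mem hmem]
    · rw [if_pos (by simp [h, hmem]), hupd, PySem.Set.add_of_not_mem hmem]
  · rw [if_neg h, if_neg (by simp [h])]
    rfl

lemma main_eq (dans : PySem.Dict String Int) (enter : List Char) (words : List String) :
    ∀ (K : Nat) (cur : List Char) (fa fb : Nat) (ans : List String),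
      enter.length - cur.length ≤ K →
      cur.length ≤ enter.length →
      enter.length - cur.length < fa →
      enter.length - cur.length < fb →
      PySem.Set.update ans (candA dans enter words fa cur)
        = dfsB (PySem.List.dedup enter) enter.length dans words fb cur
            (PySem.Dict.counter (cur.map ck)) ans := by
  intro K
  induction K with
  | zero =>
    intro cur fa fb ans hK hlen hfa hfb
    exact main_base dans enter words cur fa fb ans (by omega)
  | succ K ih =>
    intro cur fa fb ans hK hlen hfa hfb
    by_cases hl : cur.length = enter.length
    · exact main_base dans enter words cur fa fb ans hl
    · have hlt : cur.length < enter.length := lt_of_le_of_ne hlen hl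
      cases fa with
      | zero => exact absurd hfa (by omega)
      | succ fa =>
        cases fb with
        | zero => exact absurd hfb (by omega)
        | succ fb =>
          rw [candA, dfsB]
          simp only [hl, if_false]
          have hln : (cur.length = enter.length) = False := by simp [hl]
          cases hpA : (cur.length == 2 && has_prefix (String.ofList cur) words) with
          | true =>
            have hpB : (cur.length == 2 && !(hasAnyPrefixB (String.ofList cur) words)) = true := by
              rw [← has_prefix_eq_not_any]; exact hpA
            rw [if_pos hpB]
            simp [hpA, PySem.Set.update]
          | false =>
            have hpB : (cur.length == 2 && !(hasAnyPrefixB (String.ofList cur) words)) = false := by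
              rw [← has_prefix_eq_not_any]; exact hpA
            simp only [hpA, Bool.false_eq_true, if_false]
            rw [if_neg (by simp [hpB])]
            rw [update_flatMap, foldl_update_dedup]
            apply PySem.List.foldl_congr_mem
            intro a c _
            simp only [ck_def]
            rw [PySem.Dict.getD_counter]
            by_cases hpos : ((cur.map ck).count (ck c) : Int) < dans.getD (ck c) 0
            · rw [if_pos (by exact_mod_cast hpos)]
              have hmap : (cur ++ [c]).map ck = cur.map ck ++ [ck c] := by
                simp [ck]
              have hcnt : ((cur.map ck).count (ck c) : Int)
                  = (PySem.Dict.counter (cur.map ck)).getD (ck c) 0 := by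
                rw [PySem.Dict.getD_counter]
              have := ih (cur ++ [c]) fa fb a
                (by simp only [List.length_append, List.length_cons, List.length_nil]; omega)
                (by simp only [List.length_append, List.length_cons, List.length_nil]; omega)
                (by simp only [List.length_append, List.length_cons, List.length_nil]; omega)
                (by simp only [List.length_append, List.length_cons, List.length_nil]; omega)
              rw [this, hmap, counter_append, PySem.Dict.getD_counter]
            · rw [if_neg (by exact_mod_cast hpos)]
              have hover : dans.getD (ck c) 0 < (((cur ++ [c]).map ck).count (ck c) : Int) := by
                rw [count_map_ck_append, if_pos rfl]
                omega
              rw [candA_nil_overuse dans enter words (ck c) fa (cur ++ [c]) hover]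
              rfl

-- ===== VERDICT (by name: the statement is the Claim_ definition above) =====
theorem find_anagrams_helper_spec : Claim_equal_find_anagrams_helper := by
  intro d_ans enter_s current_s words ans_lst _ hpre
  unfold Spec_find_anagrams_helper
  unfold find_anagrams_helper find_anagrams_helper_alt
  rw [goA_eq, seedUsed_eq_counter]
  rcases hpre with hle | hempty
  · exact main_eq (PySem.Dict.mk d_ans) enter_s.toList words enter_s.toList.length
      current_s.toList (enter_s.toList.length + 1) (enter_s.toList.length + 1) ans_lst
      (by omega) hle (by omega) (by omega)
  · subst hempty
    have he : ("" : String).toList = ([] : List Char) := rfl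
    rw [he]
    by_cases hc : current_s.toList = []
    · rw [hc]
      exact main_eq (PySem.Dict.mk d_ans) [] words 0 [] ([].length + 1) ([].length + 1)
        ans_lst (by simp) (by simp) (by simp) (by simp)
    · -- enter_s = "" with current_s nonempty: both sides return ans_lst unchanged
      have hne : ¬ (current_s.toList.length = ([] : List Char).length) := by
        simp only [List.length_nil]
        intro h0
        exact hc (List.length_eq_zero_iff.mp h0)
      rw [candA, dfsB, if_neg hne, if_neg hne]
      have hpA : ∀ b : Bool, (current_s.toList.length == 2
            && has_prefix (String.ofList current_s.toList) words) = b →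
          (current_s.toList.length == 2
            && !(hasAnyPrefixB (String.ofList current_s.toList) words)) = b := by
        intro b hb
        rw [← has_prefix_eq_not_any]; exact hb
      cases hp : (current_s.toList.length == 2
          && has_prefix (String.ofList current_s.toList) words) with
      | true =>
        rw [if_pos (hpA true hp)]
        simp [PySem.Set.update]
      | false =>
        rw [if_neg (by simp [hpA false hp])]
        simp [PySem.List.dedup_eq_ofList, PySem.Set.ofList_nil, PySem.Set.update]

@[simp]
theorem find_anagrams_helper_raises : Claim_raises_find_anagrams_helper := by
  unfold Claim_raises_find_anagrams_helper
  refine ⟨?_, by decide⟩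
  intro d_ans enter_s current_s words ans_lst _ hr hp
  unfold Raises_find_anagrams_helper at hr
  unfold Pre_find_anagrams_helper at hp
  obtain ⟨h1, h2, -⟩ := hr
  rcases hp with h | h
  · omega
  · exact h2 h
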